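-- pv_equiv track=rewrite | github.com/drizztSun/common_project | PythonLeetcode/Leetcode/805_SplitArrayWithSameAverage.py | doit5
-- ===== SOURCE A (Python) =====
-- def doit5(A):
--     """
--     :type A: List[int]
--     :rtype: bool
--     """
--     if len(A) < 2:
--         return False
--
--     M, N = sum(A), len(A)
--     A.sort()
--     st = []
--     visited = set()
--
--     for v in A:
--
--         extra = []
--         for c in st:
--
--             v1, v2 = c[0] * M, c[1] * N
--             if v1 == v2:
--                 return True
--
--             if v1 > v2:
--                 n = (c[0] + 1, c[1] + v )
--                 if n not in visited:
--                     extra.append(n)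
--                     visited.add(n)
--
--         if (1, v) not in visited:
--             st.append((1, v))
--             visited.add((1, v))
--             if v * N == M:
--                 return True
--
--         st.extend(extra)
--
--     return False
-- ===== SOURCE B (Python) =====
-- def doit5(A):
--     # Full subset-sum DP over (size, sum) states, checked at the end.
--     # (Keeps A's in-place sort of A; return-value equivalence is what is claimed.)
--     if len(A) < 2:
--         return False
--     M, N = sum(A), len(A)
--     A.sort()
--     states = {(0, 0)}
--     for v in A:
--         states |= {(k + 1, s + v) for (k, s) in states}
--     return any(1 <= k < N and s * N == k * M for (k, s) in states)
-- ===== Notes on version B (the rewrite author's own statement) =====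
-- stated objective: alternative
-- what changed: A runs a pruned incremental search (worklist of (count,sum) states extended only while the partial average stays below the global average, with early returns inside the scan); B builds the full subset DP set of (size,sum) states with no pruning and no early exit, then decides at the end whether some state with 1 <= k < N satisfies s*N == k*M.
import Mathlib
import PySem

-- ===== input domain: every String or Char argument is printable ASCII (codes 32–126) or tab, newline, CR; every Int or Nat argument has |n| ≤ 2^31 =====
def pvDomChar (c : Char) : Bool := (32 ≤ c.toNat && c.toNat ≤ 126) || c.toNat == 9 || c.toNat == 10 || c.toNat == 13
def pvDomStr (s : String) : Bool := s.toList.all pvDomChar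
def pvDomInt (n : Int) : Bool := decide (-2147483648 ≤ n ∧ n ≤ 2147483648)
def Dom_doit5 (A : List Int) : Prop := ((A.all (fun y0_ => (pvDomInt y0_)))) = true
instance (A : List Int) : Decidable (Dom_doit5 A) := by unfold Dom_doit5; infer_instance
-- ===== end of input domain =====

-- B replaces A's pruned early-exit state search by a full subset-(size,sum) DP with one final check
-- (alternative algorithm, similar cost); A sorts its argument in place and B keeps that mutation,
-- the equivalence proved here is about the return value.


-- ===== PORT A =====
-- inner 'for c in st' loop: returns none on 'return True', otherwise some (extra, visited)
def doit5Inner (M N v : Int) : List (Int × Int) → PySem.Set (Int × Int) → List (Int × Int) →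
    Option (List (Int × Int) × PySem.Set (Int × Int))
  | [], vis, extra => some (extra, vis)
  | c :: cs, vis, extra =>
      if c.1 * M = c.2 * N then none
      else if c.1 * M > c.2 * N then
        let n := (c.1 + 1, c.2 + v)
        if PySem.Set.contains vis n then doit5Inner M N v cs vis extra
        else doit5Inner M N v cs (PySem.Set.add vis n) (extra ++ [n])
      else doit5Inner M N v cs vis extra

-- outer 'for v in A' loop with its early returns
def doit5Loop (M N : Int) : List Int → List (Int × Int) → PySem.Set (Int × Int) → Bool
  | [], _, _ => false
  | v :: rest, st, vis =>
      match doit5Inner M N v st vis [] with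
      | none => true
      | some (extra, vis1) =>
          if PySem.Set.contains vis1 (1, v) then
            doit5Loop M N rest (st ++ extra) vis1
          else if v * N = M then true
          else doit5Loop M N rest ((st ++ [(1, v)]) ++ extra) (PySem.Set.add vis1 (1, v))

def doit5 (A : List Int) : Bool :=
  if A.length < 2 then false
  else
    let M := A.sum
    let N : Int := A.length
    let As := PySem.List.sorted A (fun x => x)
    doit5Loop M N As [] PySem.Set.empty

-- ===== PORT B =====
def doit5_alt (A : List Int) : Bool :=
  if A.length < 2 then false
  else
    let M := A.sum
    let N : Int := A.length
    let As := PySem.List.sorted A (fun x => x)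
    let states := As.foldl
      (fun S v => PySem.Set.union S (PySem.Set.ofList (S.map (fun c => (c.1 + 1, c.2 + v)))))
      (PySem.Set.ofList [((0 : Int), (0 : Int))])
    states.any (fun c => decide (1 ≤ c.1 ∧ c.1 < N ∧ c.2 * N = c.1 * M))

-- ===== PRECONDITION & SPEC =====
def Spec_doit5 (A : List Int) (out : Bool) : Prop := out = doit5_alt A
instance (A : List Int) (out : Bool) : Decidable (Spec_doit5 A out) := by unfold Spec_doit5; infer_instance

-- ===== CLAIM (what is proved, stated in full; the proofs are below) =====
def Claim_equal_doit5 : Prop := ∀ (A : List Int), Dom_doit5 A → Spec_doit5 A (doit5 A)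

-- ===== LEMMAS AND PROOFS =====

-- the common semantic target: a nonempty proper sub-multiset of the sorted list with the array's average
def GoodWit (M N : Int) (As : List Int) (l : List Int) : Prop :=
  l.Sublist As ∧ l ≠ [] ∧ (l.length : Int) < N ∧ l.sum * N = (l.length : Int) * M

-- every proper nonempty prefix is strictly below the average M/N
def StrictPref (M N : Int) (l : List Int) : Prop :=
  ∀ p q, p ++ q = l → p ≠ [] → q ≠ [] → p.sum * N < (p.length : Int) * M

-- loop invariant of A (set-level reading of st/visited)
def AInv (M N : Int) (done : List Int) (st : List (Int × Int)) (vis : PySem.Set (Int × Int)) : Prop :=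
  (∀ c, c ∈ st ↔ c ∈ vis) ∧
  (∀ c ∈ vis, ∃ l : List Int, l.Sublist done ∧ l ≠ [] ∧ c = ((l.length : Int), l.sum)) ∧
  (∀ l : List Int, l.Sublist done → l ≠ [] → StrictPref M N l → ((l.length : Int), l.sum) ∈ vis)

-- ---- inner loop characterisation ----
theorem inner_none_iff (M N v : Int) (st : List (Int × Int)) (vis : PySem.Set (Int × Int))
    (extra : List (Int × Int)) :
    doit5Inner M N v st vis extra = none ↔ ∃ c ∈ st, c.1 * M = c.2 * N := by
  induction st generalizing vis extra with
  | nil => simp [doit5Inner]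
  | cons c cs ih =>
    simp only [doit5Inner]
    split_ifs with h1 h2 h3 <;>
      simp_all [List.mem_cons]

theorem inner_some_spec (M N v : Int) (st : List (Int × Int)) (vis : PySem.Set (Int × Int))
    (extra0 extra : List (Int × Int)) (vis1 : PySem.Set (Int × Int))
    (h : doit5Inner M N v st vis extra0 = some (extra, vis1)) :
    ∃ newex, extra = extra0 ++ newex ∧
      (∀ c, c ∈ vis1 ↔ c ∈ vis ∨ c ∈ newex) ∧
      (∀ c' ∈ newex, ∃ c ∈ st, c.1 * M > c.2 * N ∧ c' = (c.1 + 1, c.2 + v)) ∧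
      (∀ c ∈ st, c.1 * M > c.2 * N → (c.1 + 1, c.2 + v) ∈ vis1) := by
  induction st generalizing vis extra0 with
  | nil =>
    simp only [doit5Inner, Option.some.injEq, Prod.mk.injEq] at h
    exact ⟨[], by simp [h.1], fun c => by simp [h.2], by simp, by simp⟩
  | cons c cs ih =>
    simp only [doit5Inner] at h
    split_ifs at h with h1 h2 h3
    · -- c in visited already
      rw [PySem.Set.contains_iff] at h3
      obtain ⟨newex, he, hmem, hsrc, hext⟩ := ih vis extra0 h
      refine ⟨newex, he, hmem, ?_, ?_⟩
      · intro c' hc'; obtain ⟨d, hd, hgt, hce⟩ := hsrc c' hc'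
        exact ⟨d, List.mem_cons_of_mem _ hd, hgt, hce⟩
      · intro d hd hgt
        rcases List.mem_cons.1 hd with rfl | hd'
        · exact (hmem _).2 (Or.inl h3)
        · exact hext d hd' hgt
    · -- new state appended
      rw [PySem.Set.contains_iff] at h3
      obtain ⟨newex, he, hmem, hsrc, hext⟩ := ih (PySem.Set.add vis (c.1 + 1, c.2 + v)) (extra0 ++ [(c.1 + 1, c.2 + v)]) h
      refine ⟨(c.1 + 1, c.2 + v) :: newex, by simp [he], ?_, ?_, ?_⟩
      · intro cc
        rw [hmem cc, PySem.Set.mem_add]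
        simp [List.mem_cons]
        tauto
      · intro c' hc'
        rcases List.mem_cons.1 hc' with rfl | hc''
        · exact ⟨c, List.mem_cons_self .., h2, rfl⟩
        · obtain ⟨d, hd, hgt, hce⟩ := hsrc c' hc''
          exact ⟨d, List.mem_cons_of_mem _ hd, hgt, hce⟩
      · intro d hd hgt
        rcases List.mem_cons.1 hd with rfl | hd'
        · exact (hmem _).2 (Or.inl (by rw [PySem.Set.mem_add]; right; rfl))
        · exact hext d hd' hgt
    · -- neither equal nor greater
      obtain ⟨newex, he, hmem, hsrc, hext⟩ := ih vis extra0 h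
      refine ⟨newex, he, hmem, ?_, ?_⟩
      · intro c' hc'; obtain ⟨d, hd, hgt, hce⟩ := hsrc c' hc'
        exact ⟨d, List.mem_cons_of_mem _ hd, hgt, hce⟩
      · intro d hd hgt
        rcases List.mem_cons.1 hd with rfl | hd'
        · exact absurd hgt h2
        · exact hext d hd' hgt

-- ---- the one-step dichotomy used by both directions ----
theorem step_dichotomy (M N v : Int) (done rest : List Int) (st : List (Int × Int))
    (vis : PySem.Set (Int × Int)) (hinv : AInv M N done st vis) :
    ((∃ c ∈ st, c.1 * M = c.2 * N) ∧ doit5Loop M N (v :: rest) st vis = true) ∨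
    (v * N = M ∧ doit5Loop M N (v :: rest) st vis = true) ∨
    (∃ st2 vis2, doit5Loop M N (v :: rest) st vis = doit5Loop M N rest st2 vis2 ∧
      AInv M N (done ++ [v]) st2 vis2 ∧ (∀ c ∈ st, c.1 * M ≠ c.2 * N)) := by
  obtain ⟨hmem, hsound, hcomp⟩ := hinv
  cases hin : doit5Inner M N v st vis [] with
  | none =>
    exact Or.inl ⟨(inner_none_iff M N v st vis []).1 hin, by simp [doit5Loop, hin]⟩
  | some p =>
    obtain ⟨extra, vis1⟩ := p
    obtain ⟨newex, he, hv1, hsrc, hext⟩ := inner_some_spec M N v st vis [] extra vis1 hin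
    simp only [List.nil_append] at he; subst he
    have hnoeq : ∀ c ∈ st, c.1 * M ≠ c.2 * N := by
      intro c hc hceq
      have : doit5Inner M N v st vis [] = none := (inner_none_iff M N v st vis []).2 ⟨c, hc, hceq⟩
      rw [this] at hin; cases hin
    -- soundness of the new states, shared by both recursive branches
    have hsound1 : ∀ c ∈ vis1,
        ∃ l : List Int, l.Sublist (done ++ [v]) ∧ l ≠ [] ∧ c = ((l.length : Int), l.sum) := by
      intro c hc
      rcases (hv1 c).1 hc with hc' | hc'
      · obtain ⟨l, hl, hlne, hce⟩ := hsound c hc'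
        exact ⟨l, hl.trans (List.sublist_append_left done [v]), hlne, hce⟩
      · obtain ⟨d, hd, _, rfl⟩ := hsrc c hc'
        obtain ⟨l, hl, hlne, hde⟩ := hsound d ((hmem d).1 hd)
        refine ⟨l ++ [v], hl.append (List.Sublist.refl [v]), by simp, ?_⟩
        rw [hde]; simp
    -- completeness for sublists of done ++ [v]; the singleton [v] case is branch-specific
    have hcomp1 : ∀ l : List Int, l.Sublist (done ++ [v]) → l ≠ [] → StrictPref M N l →
        ((l.length : Int), l.sum) ∈ vis1 ∨ l = [v] := by
      intro l hl hlne hsp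
      obtain ⟨l₁, l₂, rfl, hl₁, hl₂⟩ := List.sublist_append_iff.1 hl
      rcases List.sublist_cons_iff.1 hl₂ with h2 | ⟨t, rfl, ht⟩
      · rw [List.sublist_nil] at h2; subst h2
        rw [List.append_nil] at hlne hsp ⊢
        exact Or.inl ((hv1 _).2 (Or.inl (hcomp l₁ hl₁ hlne hsp)))
      · rw [List.sublist_nil] at ht; subst ht
        rcases List.eq_nil_or_concat l₁ with rfl | _
        · exact Or.inr rfl
        · have hl₁ne : l₁ ≠ [] := by rintro rfl; simp_all
          have hgt : l₁.sum * N < (l₁.length : Int) * M :=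
            hsp l₁ [v] rfl hl₁ne (by simp)
          have hsp₁ : StrictPref M N l₁ := by
            intro p q hpq hp hq
            exact hsp p (q ++ [v]) (by rw [← hpq]; simp) hp (by simp)
          have hst : ((l₁.length : Int), l₁.sum) ∈ st :=
            (hmem _).2 (hcomp l₁ hl₁ hl₁ne hsp₁)
          have := hext _ hst (by simpa using hgt)
          left
          have hEq : ((((l₁ ++ [v]).length : Nat) : Int), (l₁ ++ [v]).sum) =
              ((l₁.length : Int) + 1, l₁.sum + v) := by simp
          rw [hEq]
          exact this
    by_cases hone : (1, v) ∈ vis1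
    · right; right
      refine ⟨st ++ extra, vis1, ?_, ⟨?_, hsound1, ?_⟩, hnoeq⟩
      · have hc : PySem.Set.contains vis1 (1, v) = true :=
          (PySem.Set.contains_iff vis1 (1, v)).2 hone
        simp only [doit5Loop, hin, hc, if_true]
      · intro c
        rw [List.mem_append, hmem c, hv1 c]
      · intro l hl hlne hsp
        rcases hcomp1 l hl hlne hsp with h | rfl
        · exact h
        · simpa using hone
    · by_cases hvm : v * N = M
      · right; left
        refine ⟨hvm, ?_⟩
        have : PySem.Set.contains vis1 (1, v) = false := by
          rw [← Bool.not_eq_true, PySem.Set.contains_iff]; exact hone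
        simp only [doit5Loop, hin, this, Bool.false_eq_true, if_false, if_pos hvm]
      · right; right
        have hcf : PySem.Set.contains vis1 (1, v) = false := by
          rw [← Bool.not_eq_true, PySem.Set.contains_iff]; exact hone
        refine ⟨(st ++ [(1, v)]) ++ extra, PySem.Set.add vis1 (1, v), ?_, ⟨?_, ?_, ?_⟩, hnoeq⟩
        · simp only [doit5Loop, hin, hcf, Bool.false_eq_true, if_false, if_neg hvm]
        · intro c
          rw [PySem.Set.mem_add]
          simp only [List.mem_append, List.mem_singleton, hmem c, hv1 c]
          tauto
        · intro c hc
          rw [PySem.Set.mem_add] at hc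
          rcases hc with hc | rfl
          · exact hsound1 c hc
          · exact ⟨[v], (List.nil_sublist done).append (List.Sublist.refl [v]), by simp, by simp⟩
        · intro l hl hlne hsp
          rw [PySem.Set.mem_add]
          rcases hcomp1 l hl hlne hsp with h | rfl
          · exact Or.inl h
          · right; simp

-- ---- soundness: loop true → witness ----
theorem loop_sound (M N : Int) (As : List Int) (hN : N = (As.length : Int)) (h2 : 2 ≤ As.length) :
    ∀ rest done st vis, As = done ++ rest → AInv M N done st vis →
      doit5Loop M N rest st vis = true → ∃ l, GoodWit M N As l := by
  intro rest
  induction rest with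
  | nil => intro done st vis _ _ htrue; simp [doit5Loop] at htrue
  | cons v rest ih =>
    intro done st vis hsplit hinv htrue
    rcases step_dichotomy M N v done rest st vis hinv with ⟨⟨c, hc, hceq⟩, _⟩ | ⟨hvm, _⟩ | ⟨st2, vis2, heq, hinv2, _⟩
    · obtain ⟨l, hl, hlne, rfl⟩ := hinv.2.1 c (hinv.1 c |>.1 hc)
      refine ⟨l, hl.trans (by rw [hsplit]; exact List.sublist_append_left done (v :: rest)), hlne, ?_, ?_⟩
      · have h1 : l.length ≤ done.length := hl.length_le
        have h2 : done.length < As.length := by rw [hsplit]; simp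
        omega
      · exact hceq.symm
    · refine ⟨[v], ?_, by simp, by rw [hN]; exact_mod_cast h2, by simpa using hvm⟩
      rw [hsplit]
      exact (List.Sublist.cons₂ v (List.nil_sublist rest)).trans (List.sublist_append_right done (v :: rest))
    · rw [heq] at htrue
      exact ih (done ++ [v]) st2 vis2 (by rw [hsplit]; simp) hinv2 htrue

-- ---- completeness: strict witness → loop true ----
theorem loop_complete (M N : Int) (As bs : List Int) (x : Int) (_hAs : As = bs ++ [x])
    (w : List Int) (_hwb : w.Sublist bs) (hwne : w ≠ []) (hsp : StrictPref M N w)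
    (heq : w.sum * N = (w.length : Int) * M) :
    ∀ rest done st vis, As = done ++ rest → AInv M N done st vis →
      (∃ w1 w2, w = w1 ++ w2 ∧ w1.Sublist done ∧ (w2 ++ [x]).Sublist rest) →
      doit5Loop M N rest st vis = true := by
  intro rest
  induction rest with
  | nil =>
    rintro done st vis _ _ ⟨w1, w2, _, _, hw2⟩
    rw [List.sublist_nil] at hw2
    exact absurd hw2 (by simp)
  | cons v rest ih =>
    rintro done st vis hsplit hinv ⟨w1, w2, hw, hw1, hw2⟩
    rcases step_dichotomy M N v done rest st vis hinv with ⟨_, ht⟩ | ⟨_, ht⟩ | ⟨st2, vis2, hloop, hinv2, hnoeq⟩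
    · exact ht
    · exact ht
    · cases w2 with
      | nil =>
        exfalso
        rw [List.append_nil] at hw
        subst hw
        have hst : ((w.length : Int), w.sum) ∈ st :=
          (hinv.1 _).2 (hinv.2.2 w hw1 hwne hsp)
        exact hnoeq _ hst (by simpa using heq.symm)
      | cons u w2' =>
        rw [hloop]
        rw [List.cons_append] at hw2
        rcases List.sublist_cons_iff.1 hw2 with h | ⟨t, hte, ht⟩
        · exact ih (done ++ [v]) st2 vis2 (by rw [hsplit]; simp) hinv2
            ⟨w1, u :: w2', hw, hw1.trans (List.sublist_append_left done [v]), h⟩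
        · injection hte with h1 h2
          subst h2
          exact ih (done ++ [v]) st2 vis2 (by rw [hsplit]; simp) hinv2
            ⟨w1 ++ [u], w2', by rw [hw]; simp,
              by rw [h1]; exact hw1.append (List.Sublist.refl [v]), ht⟩

-- ---- sorted-prefix (Chebyshev) argument and strict-witness extraction ----
theorem sum_mul_le (p q : List Int) (h : ∀ a ∈ p, ∀ b ∈ q, a ≤ b) :
    p.sum * (q.length : Int) ≤ (p.length : Int) * q.sum := by
  induction p with
  | nil => simp
  | cons a p ih =>
    have h1 : ∀ b ∈ q, a ≤ b := h a (List.mem_cons_self ..)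
    have h2 : a * (q.length : Int) ≤ q.sum := by
      clear h ih
      induction q with
      | nil => simp
      | cons b q ihq =>
        have := h1 b (List.mem_cons_self ..)
        have := ihq (fun b hb => h1 b (List.mem_cons_of_mem _ hb))
        push_cast [List.length_cons, List.sum_cons] at *
        nlinarith
    have h3 := ih (fun x hx => h x (List.mem_cons_of_mem _ hx))
    push_cast [List.length_cons, List.sum_cons] at *
    nlinarith

theorem exists_strict_witness (M N : Int) (hNpos : 0 < N) (bs : List Int)
    (hsorted : bs.Pairwise (· ≤ ·)) :
    ∀ n (w : List Int), w.length = n → w.Sublist bs → w ≠ [] →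
      w.sum * N = (w.length : Int) * M →
      ∃ w', w'.Sublist bs ∧ w' ≠ [] ∧ w'.sum * N = (w'.length : Int) * M ∧ StrictPref M N w' := by
  intro n
  induction n using Nat.strong_induction_on with
  | _ n ih =>
    intro w hlen hwb hwne heq
    by_cases hsp : StrictPref M N w
    · exact ⟨w, hwb, hwne, heq, hsp⟩
    · unfold StrictPref at hsp
      push Not at hsp
      obtain ⟨p, q, hpq, hp, hq, hge⟩ := hsp
      -- the prefix sits weakly below the average (Chebyshev on the sorted witness) …
      have hpair : w.Pairwise (· ≤ ·) := hsorted.sublist hwb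
      have hcross : ∀ a ∈ p, ∀ b ∈ q, a ≤ b := by
        rw [← hpq] at hpair
        exact fun a ha b hb => (List.pairwise_append.1 hpair).2.2 a ha b hb
      have cheb := sum_mul_le p q hcross
      have h1 : p.sum * (w.length : Int) ≤ (p.length : Int) * w.sum := by
        rw [← hpq]
        push_cast [List.length_append, List.sum_append]
        nlinarith [cheb]
      have hwlpos : (0 : Int) < (w.length : Int) := by
        have : w ≠ [] := hwne
        have := List.length_pos_iff.2 this
        exact_mod_cast this
      have hle : p.sum * N ≤ (p.length : Int) * M := by
        have h2 : p.sum * (w.length : Int) * N ≤ (p.length : Int) * w.sum * N := by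
          exact mul_le_mul_of_nonneg_right h1 (le_of_lt hNpos)
        have h3 : (p.length : Int) * w.sum * N = (p.length : Int) * (w.length : Int) * M := by
          rw [mul_assoc, heq]; ring
        have h4 : p.sum * N * (w.length : Int) ≤ (p.length : Int) * M * (w.length : Int) := by
          nlinarith [h2, h3]
        exact le_of_mul_le_mul_right h4 hwlpos
      -- … hence it is an exact smaller witness; recurse
      have heqp : p.sum * N = (p.length : Int) * M := le_antisymm hle hge
      have hplt : p.length < n := by
        have : w.length = p.length + q.length := by rw [← hpq]; simp
        have hqpos : 0 < q.length := List.length_pos_iff.2 hq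
        omega
      exact ih p.length hplt p rfl ((hpq ▸ List.sublist_append_left p q).trans hwb) hp heqp

-- complement of a sublist is a sublist
theorem sublist_compl (l as : List Int) (h : l.Sublist as) :
    ∃ r, r.Sublist as ∧ as.Perm (l ++ r) := by
  induction h with
  | slnil => exact ⟨[], List.Sublist.refl _, by simp⟩
  | @cons l₁ l₂ a hs ih =>
    obtain ⟨r, hr, hp⟩ := ih
    exact ⟨a :: r, List.Sublist.cons₂ a hr,
      ((hp.cons a).trans (List.Perm.symm (List.perm_middle)))⟩
  | @cons₂ l₁ l₂ a hs ih =>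
    obtain ⟨r, hr, hp⟩ := ih
    exact ⟨r, hr.cons a, hp.cons a⟩

-- ---- B-side DP characterisation ----
theorem mem_dp (as : List Int) :
    ∀ (S : PySem.Set (Int × Int)) (c : Int × Int),
      (c ∈ as.foldl
        (fun S v => PySem.Set.union S (PySem.Set.ofList (S.map (fun c => (c.1 + 1, c.2 + v))))) S)
      ↔ ∃ c0 ∈ S, ∃ l : List Int, l.Sublist as ∧ c = (c0.1 + (l.length : Int), c0.2 + l.sum) := by
  induction as with
  | nil =>
    intro S c
    simp only [List.foldl_nil, List.sublist_nil]
    constructor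
    · intro hc; exact ⟨c, hc, [], rfl, by simp⟩
    · rintro ⟨c0, hc0, l, rfl, rfl⟩; simpa using hc0
  | cons v as ih =>
    intro S c
    rw [List.foldl_cons, ih]
    constructor
    · rintro ⟨c0, hc0, l, hl, rfl⟩
      rw [PySem.Set.mem_union] at hc0
      rcases hc0 with hc0 | hc0
      · exact ⟨c0, hc0, l, hl.cons v, rfl⟩
      · rw [PySem.Set.mem_ofList, List.mem_map] at hc0
        obtain ⟨d, hd, rfl⟩ := hc0
        refine ⟨d, hd, v :: l, List.Sublist.cons₂ v hl, ?_⟩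
        simp [Prod.ext_iff]; constructor <;> ring
    · rintro ⟨c0, hc0, l, hl, rfl⟩
      rcases List.sublist_cons_iff.1 hl with hl' | ⟨t, rfl, ht⟩
      · exact ⟨c0, by rw [PySem.Set.mem_union]; exact Or.inl hc0, l, hl', rfl⟩
      · refine ⟨(c0.1 + 1, c0.2 + v), ?_, t, ht, ?_⟩
        · rw [PySem.Set.mem_union]; right
          rw [PySem.Set.mem_ofList, List.mem_map]
          exact ⟨c0, hc0, rfl⟩
        · simp [Prod.ext_iff]; constructor <;> ring

theorem alt_true_iff (A : List Int) (h2 : 2 ≤ A.length) :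
    doit5_alt A = true ↔
     ∃ l, GoodWit A.sum (A.length : Int) (PySem.List.sorted A (fun x => x)) l := by
  unfold doit5_alt
  rw [if_neg (show ¬(A.length < 2) by omega)]
  simp only [List.any_eq_true, decide_eq_true_iff]
  constructor
  · rintro ⟨c, hc, hpred⟩
    rw [mem_dp] at hc
    obtain ⟨c0, hc0, l, hl, rfl⟩ := hc
    have hc0' : c0 = ((0 : Int), (0 : Int)) := by
      simpa [PySem.Set.mem_ofList] using hc0
    subst hc0'
    obtain ⟨hk1, hkN, heq⟩ := hpred
    refine ⟨l, hl, ?_, by simpa using hkN, by simpa using heq⟩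
    rintro rfl
    simp at hk1
  · rintro ⟨l, hl, hlne, hlt, heq⟩
    refine ⟨((l.length : Int), l.sum), ?_, ?_, by simpa using hlt, by simpa using heq⟩
    · rw [mem_dp]
      exact ⟨((0 : Int), (0 : Int)), by simp [PySem.Set.mem_ofList], l, hl, by simp⟩
    · have := List.length_pos_iff.2 hlne
      simp
      omega

theorem a_true_iff (A : List Int) (h2 : 2 ≤ A.length) :
    doit5 A = true ↔
     ∃ l, GoodWit A.sum (A.length : Int) (PySem.List.sorted A (fun x => x)) l := by
  set As := PySem.List.sorted A (fun x => x) with hAsdef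
  have hlen : As.length = A.length := (PySem.List.sorted_perm A (fun x => x) false).length_eq
  have hMs : As.sum = A.sum := (PySem.List.sorted_perm A (fun x => x) false).sum_eq
  have hinv0 : AInv A.sum (A.length : Int) [] [] PySem.Set.empty := by
    refine ⟨by simp [PySem.Set.empty], by simp [PySem.Set.empty], ?_⟩
    intro l hl hlne _
    rw [List.sublist_nil] at hl
    exact absurd hl hlne
  constructor
  · intro htrue
    have htrue' : doit5Loop A.sum (A.length : Int) As [] PySem.Set.empty = true := by
      unfold doit5 at htrue
      rw [if_neg (show ¬(A.length < 2) by omega)] at htrue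
      exact htrue
    exact loop_sound A.sum (A.length : Int) As (by exact_mod_cast hlen.symm)
      (by omega) As [] [] PySem.Set.empty (by simp) hinv0 htrue'
  · rintro ⟨l, hl, hlne, hlt, heq⟩
    have hAsne : As ≠ [] := by
      intro h; rw [h] at hlen; simp at hlen; omega
    obtain ⟨bs, x, hbs⟩ : ∃ bs x, As = bs ++ [x] :=
      ⟨As.dropLast, As.getLast hAsne, (List.dropLast_append_getLast hAsne).symm⟩
    have hpairAs : As.Pairwise (· ≤ ·) := by
      simpa using PySem.List.sorted_pairwise A (fun x => x)
    have hbs_sorted : bs.Pairwise (· ≤ ·) :=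
      hpairAs.sublist (hbs ▸ List.sublist_append_left bs [x])
    -- once any witness avoiding the last element exists, A's search must fire
    have hfin : ∀ w0 : List Int, w0.Sublist bs → w0 ≠ [] →
        w0.sum * (A.length : Int) = (w0.length : Int) * A.sum → doit5 A = true := by
      intro w0 hw0b hw0ne hw0eq
      obtain ⟨w, hwb, hwne, hweq, hwsp⟩ :=
        exists_strict_witness A.sum (A.length : Int) (by exact_mod_cast Nat.lt_of_lt_of_le Nat.zero_lt_two h2)
          bs hbs_sorted w0.length w0 rfl hw0b hw0ne hw0eq
      have : doit5Loop A.sum (A.length : Int) As [] PySem.Set.empty = true :=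
        loop_complete A.sum (A.length : Int) As bs x hbs w hwb hwne hwsp hweq
          As [] [] PySem.Set.empty (by simp) hinv0
          ⟨[], w, by simp, List.Sublist.refl [],
            by rw [hbs]; exact hwb.append (List.Sublist.refl [x])⟩
      unfold doit5
      rw [if_neg (show ¬(A.length < 2) by omega)]
      exact this
    -- split the given witness on whether it uses the last element
    obtain ⟨l₁, l₂, rfl, hl₁, hl₂⟩ := List.sublist_append_iff.1 (hbs ▸ hl)
    rcases List.sublist_cons_iff.1 hl₂ with h2' | ⟨t, hte, ht⟩
    · rw [List.sublist_nil] at h2'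
      subst h2'
      refine hfin l₁ hl₁ (by simpa using hlne) ?_
      simpa using heq
    · rw [List.sublist_nil] at ht
      subst ht
      subst hte
      obtain ⟨r, hr, hperm⟩ := sublist_compl l₁ bs hl₁
      have hbslen : bs.length = l₁.length + r.length := by
        have := hperm.length_eq; simpa using this
      have hbssum : bs.sum = l₁.sum + r.sum := by
        have := hperm.sum_eq; simpa using this
      have hAlen : bs.length + 1 = A.length := by
        rw [← hlen, hbs]; simp
    -- complement arithmetic
      have e1 : (l₁.sum + x) * (A.length : Int) = ((l₁.length : Int) + 1) * A.sum := by
        have h := heq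
        simp only [List.sum_append, List.length_append, List.sum_cons, List.sum_nil,
          List.length_cons, List.length_nil] at h
        push_cast at h
        linear_combination h
      have e2 : l₁.sum + r.sum + x = A.sum := by
        rw [← hMs, hbs]
        simp [hbssum]
      have e3 : (l₁.length : Int) + (r.length : Int) + 1 = (A.length : Int) := by
        exact_mod_cast congrArg (Nat.cast : Nat → Int) (by omega : l₁.length + r.length + 1 = A.length)
      have hllt : l₁.length + 1 < A.length := by
        have h' : (l₁ ++ [x]).length < A.length := by exact_mod_cast hlt
        simpa using h'
      refine hfin r hr ?_ ?_
      · intro hre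
        subst hre
        simp at hbslen
        omega
      · linear_combination (-1 : Int) * e1 + (A.length : Int) * e2 - A.sum * e3

-- ===== VERDICT (by name: the statement is the Claim_ definition above) =====
theorem doit5_spec : Claim_equal_doit5 := by
  intro A _
  unfold Spec_doit5
  by_cases h2 : 2 ≤ A.length
  · have := a_true_iff A h2
    have := alt_true_iff A h2
    rcases Bool.eq_false_or_eq_true (doit5 A) with h | h <;>
      rcases Bool.eq_false_or_eq_true (doit5_alt A) with h' | h' <;>
      simp_all
  · simp [doit5, doit5_alt, show A.length < 2 by omega]
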